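-- pv_equiv track=rewrite | github.com/lucifer-140/Informatika_UPH | Semester1/meeting_16/Dave_03082230030/no_4.py | remove_num
-- ===== SOURCE A (Python) =====
-- def remove_num(source_list: list, x: int):
--    count = 0
--    for i in range(len(source_list) - 1, -1, -1):
--       if source_list[i] == x:
--          source_list.pop(i)
--          count += 1
--    for i in range (count):
--       source_list.append("_")
--    return count
-- ===== SOURCE B (Python) =====
-- def remove_num(source_list: list, x: int):
--     # Forward write-pointer compaction: one pass, no destructive pops.
--     j = 0
--     n = len(source_list)
--     for i in range(n):
--         if source_list[i] != x:
--             source_list[j] = source_list[i]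
--             j += 1
--     count = n - j
--     for pos in range(j, n):
--         source_list[pos] = "_"
--     return count
-- ===== Notes on version B (the rewrite author's own statement) =====
-- stated objective: alternative
-- what changed: Replaces the backward scan with destructive list.pop(i) calls by a single forward pass with a write pointer that compacts kept elements in place and then overwrites the tail with '_' placeholders, returning count = n - kept.
import Mathlib
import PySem

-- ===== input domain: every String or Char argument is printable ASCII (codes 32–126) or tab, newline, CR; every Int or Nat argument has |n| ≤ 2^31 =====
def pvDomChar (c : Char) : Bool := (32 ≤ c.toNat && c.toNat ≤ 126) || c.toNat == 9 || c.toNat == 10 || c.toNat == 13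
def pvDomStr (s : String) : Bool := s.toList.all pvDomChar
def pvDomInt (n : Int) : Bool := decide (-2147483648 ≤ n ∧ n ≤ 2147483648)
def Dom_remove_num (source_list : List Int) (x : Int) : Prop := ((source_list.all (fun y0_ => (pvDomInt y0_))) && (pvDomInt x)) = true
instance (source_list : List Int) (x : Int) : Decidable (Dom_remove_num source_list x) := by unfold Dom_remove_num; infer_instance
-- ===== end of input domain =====

-- B replaces A's backward pop-loop by a single forward write-pointer compaction (alternative algorithm);
-- both mutate the Python list identically, and the equivalence proved here is about the returned count.


-- ===== PORT A =====
-- the loop 'for i in range(len(source_list)-1, -1, -1)': removeLoopA x k l runs indices k-1 down to 0,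
-- threading the mutated list; pops at index i only change positions ≥ i, so earlier reads are unaffected.
def removeLoopA (x : Int) : Nat → List Int → List Int × Int
  | 0, l => (l, 0)
  | k+1, l =>
      match PySem.List.pyGet? l (k : Int) with
      | some v =>
          if v = x then
            match PySem.List.pop? l (k : Int) with
            | some (_, l') => let r := removeLoopA x k l'; (r.1, r.2 + 1)
            | none => removeLoopA x k l   -- unreachable: index k is in range when the pop runs
          else removeLoopA x k l
      | none => removeLoopA x k l         -- unreachable in A's loop
-- the trailing 'for i in range(count): source_list.append("_")' only mutates the list and
-- does not affect the returned count, so the port returns the count of the first loop.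
def remove_num (source_list : List Int) (x : Int) : Int :=
  (removeLoopA x source_list.length source_list).2

-- ===== PORT B =====
-- Source B's forward pass: reads source_list[i] always see original values, because the only writes are at
-- positions j ≤ i (and the write at j = i is the identity); so the pass is a fold over the original
-- elements advancing the write pointer j. The placeholder-fill loop does not affect the returned count.
def remove_num_alt (source_list : List Int) (x : Int) : Int :=
  (source_list.length : Int) -
    source_list.foldl (fun j v => if v ≠ x then j + 1 else j) 0

-- ===== PRECONDITION & SPEC =====
def Spec_remove_num (source_list : List Int) (x : Int) (out : Int) : Prop := out = remove_num_alt source_list x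
instance (source_list : List Int) (x : Int) (out : Int) : Decidable (Spec_remove_num source_list x out) := by unfold Spec_remove_num; infer_instance

-- ===== CLAIM (what is proved, stated in full; the proofs are below) =====
def Claim_equal_remove_num : Prop := ∀ (source_list : List Int) (x : Int), Dom_remove_num source_list x → Spec_remove_num source_list x (remove_num source_list x)

-- ===== LEMMAS AND PROOFS =====

-- A's loop counts the occurrences of x among the first k elements.
theorem removeLoopA_count (x : Int) : ∀ (k : Nat) (l : List Int), k ≤ l.length →
    (removeLoopA x k l).2 = ((l.take k).count x : Int) := by
  intro k
  induction k with
  | zero => intro l h; simp [removeLoopA]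
  | succ k ih =>
      intro l h
      have hk : k < l.length := by omega
      have hget : PySem.List.pyGet? l (k : Int) = some l[k] :=
        PySem.List.pyGet?_ofNat (h := hk)
      have hgetE : l[k]? = some l[k] := List.getElem?_eq_getElem hk
      have hcount : (l.take (k+1)).count x
          = (l.take k).count x + (if l[k] = x then 1 else 0) := by
        have h1 : List.count x [l[k]] = if l[k] = x then 1 else 0 := by
          by_cases hx : l[k] = x <;> simp [hx]
        rw [List.take_add_one, hgetE, Option.toList_some, List.count_append, h1]
      by_cases hx : l[k] = x
      · have hpop : PySem.List.pop? l (k : Int) = some (l[k], l.eraseIdx k) :=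
          PySem.List.pop?_natCast (h := hk)
        have herase : (l.eraseIdx k).take k = l.take k := by
          rw [List.eraseIdx_eq_take_drop_succ]
          rw [List.take_append_of_le_length (by simp [List.length_take]; omega)]
          simp [List.take_take]
        have hlen : k ≤ (l.eraseIdx k).length := by
          rw [List.length_eraseIdx_of_lt hk]; omega
        simp only [removeLoopA, hget, if_pos hx, hpop]
        rw [ih _ hlen, herase, hcount, if_pos hx]
        push_cast; ring
      · simp only [removeLoopA, hget, if_neg hx]
        rw [ih _ (by omega), hcount, if_neg hx]
        simp

-- B's fold computes j plus the number of elements different from x.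
theorem foldB_count (x : Int) : ∀ (l : List Int) (j : Int),
    l.foldl (fun j v => if v ≠ x then j + 1 else j) j
      = j + (l.length : Int) - (l.count x : Int) := by
  intro l
  induction l with
  | nil => intro j; simp
  | cons v l ih =>
      intro j
      by_cases hv : v = x
      · rw [List.foldl_cons, if_neg (not_not_intro hv), ih]
        simp [hv]
        ring
      · rw [List.foldl_cons, if_pos hv, ih]
        simp [hv]
        ring

-- ===== VERDICT (by name: the statement is the Claim_ definition above) =====
theorem remove_num_spec : Claim_equal_remove_num := by
  intro l x _
  unfold Spec_remove_num remove_num remove_num_alt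
  rw [removeLoopA_count x l.length l le_rfl, List.take_length, foldB_count]
  have hc : l.count x ≤ l.length := List.count_le_length
  omega
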